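-- pv_equiv track=rewrite | github.com/GabrielG-tech/Bloco_Programacao_Python | Python para Dados/TP03/Parte 2/ex02.py | filtrar_pares_positivos
-- ===== SOURCE A (Python) =====
-- class ErroNumeroNegativo(Exception):
--     def __init__(self, message="Número negativo encontrado."):
--         self.message = message
--         super().__init__(self.message)
--
-- def filtrar_pares_positivos(lista):
--     """
--     Filtra uma lista de números para retornar apenas os números pares e positivos.
--
--     Args:
--         lista: Lista contendo números inteiros.
--
--     Returns:
--         lista: Lista contendo apenas os números pares e positivos da lista de entrada.
--
--     Raises:
--         ErroNumeroNegativo: Se um número negativo for encontrado na lista, uma exceção é lançada indicando o número negativo encontrado e a execução é interrompida.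
--     """
--     numeros_filtrados = []
--     for num in lista:
--         if num < 0:
--             raise ErroNumeroNegativo(f"Número negativo encontrado: {num}")
--         elif num % 2 == 0:
--             numeros_filtrados.append(num)
--     return numeros_filtrados
-- ===== SOURCE B (Python) =====
-- class ErroNumeroNegativo(Exception):
--     def __init__(self, message="Número negativo encontrado."):
--         self.message = message
--         super().__init__(self.message)
--
-- def filtrar_pares_positivos(lista):
--     bad = next((x for x in lista if x < 0), None)
--     if bad is not None:
--         raise ErroNumeroNegativo(f"Número negativo encontrado: {bad}")
--     return [x for x in lista if x % 2 == 0]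
-- ===== Notes on version B (the rewrite author's own statement) =====
-- stated objective: simpler
-- what changed: Replaces the single fused loop (validate-and-accumulate with an explicit accumulator) by a validation pass locating the first negative (next) followed by a filtering list comprehension.
import Mathlib
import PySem

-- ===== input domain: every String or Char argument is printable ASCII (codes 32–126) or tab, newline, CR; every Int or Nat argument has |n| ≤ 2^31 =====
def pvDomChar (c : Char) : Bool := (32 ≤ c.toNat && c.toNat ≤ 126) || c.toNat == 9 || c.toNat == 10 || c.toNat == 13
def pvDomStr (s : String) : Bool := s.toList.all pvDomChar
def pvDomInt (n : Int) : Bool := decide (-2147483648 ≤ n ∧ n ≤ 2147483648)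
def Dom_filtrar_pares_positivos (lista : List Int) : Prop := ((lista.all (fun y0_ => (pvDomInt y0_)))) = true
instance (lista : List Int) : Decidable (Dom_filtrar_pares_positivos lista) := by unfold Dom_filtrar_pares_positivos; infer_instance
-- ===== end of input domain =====

-- B replaces A's fused validate-and-accumulate loop by a first-negative search followed by a filter; objective: simpler.
-- Both A and B raise ErroNumeroNegativo when the list contains a negative; Pre_ excludes those inputs.

-- ===== PORT A =====
-- the for-loop of A with its accumulator; the `num < 0` branch raises in Python (excluded by Pre_)
def pvALoop (acc : List Int) : List Int → List Int
  | [] => acc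
  | num :: rest =>
    if num < 0 then acc  -- raise ErroNumeroNegativo: inputs reaching this are outside Pre_
    else if PySem.Int.mod num 2 = 0 then pvALoop (acc ++ [num]) rest
    else pvALoop acc rest

def filtrar_pares_positivos (lista : List Int) : List Int := pvALoop [] lista

-- ===== PORT B =====
def filtrar_pares_positivos_alt (lista : List Int) : List Int :=
  match lista.find? (fun x => x < 0) with
  | some _ => []  -- raise ErroNumeroNegativo: inputs reaching this are outside Pre_
  | none => lista.filter (fun x => PySem.Int.mod x 2 = 0)

-- ===== PRECONDITION & SPEC =====
-- Pre_ excludes exactly the inputs containing a negative number, on which Python A raises ErroNumeroNegativo.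
def Pre_filtrar_pares_positivos (lista : List Int) : Prop := ∀ x ∈ lista, 0 ≤ x
instance (lista : List Int) : Decidable (Pre_filtrar_pares_positivos lista) := by unfold Pre_filtrar_pares_positivos; infer_instance
def pvWitness_filtrar_pares_positivos : List Int := [0, 1, 2, 3, 4, 7, 10]

def Spec_filtrar_pares_positivos (lista : List Int) (out : List Int) : Prop := out = filtrar_pares_positivos_alt lista
instance (lista : List Int) (out : List Int) : Decidable (Spec_filtrar_pares_positivos lista out) := by unfold Spec_filtrar_pares_positivos; infer_instance

-- ===== CLAIM (what is proved, stated in full; the proofs are below) =====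
def Claim_equal_filtrar_pares_positivos : Prop := ∀ (lista : List Int), Dom_filtrar_pares_positivos lista → Pre_filtrar_pares_positivos lista → Spec_filtrar_pares_positivos lista (filtrar_pares_positivos lista)

-- ===== LEMMAS AND PROOFS =====
theorem pvALoop_eq_filter (lista : List Int) :
    ∀ acc : List Int, (∀ x ∈ lista, 0 ≤ x) →
      pvALoop acc lista = acc ++ lista.filter (fun x => PySem.Int.mod x 2 = 0) := by
  induction lista with
  | nil => intro acc _; simp [pvALoop]
  | cons n rest ih =>
    intro acc h
    have hn : 0 ≤ n := h n (List.mem_cons_self ..)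
    have hrest : ∀ x ∈ rest, 0 ≤ x := fun x hx => h x (List.mem_cons_of_mem _ hx)
    simp only [pvALoop, List.filter_cons]
    rw [if_neg (by omega)]
    by_cases hm : PySem.Int.mod n 2 = 0
    · rw [if_pos hm, if_pos (by simpa using hm), ih _ hrest]; simp
    · rw [if_neg hm, if_neg (by simpa using hm), ih _ hrest]

-- ===== VERDICT (by name: the statement is the Claim_ definition above) =====
theorem filtrar_pares_positivos_spec : Claim_equal_filtrar_pares_positivos := by
  intro lista _ hpre
  unfold Spec_filtrar_pares_positivos filtrar_pares_positivos filtrar_pares_positivos_alt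
  have hfind : lista.find? (fun x => x < 0) = none := by
    rw [List.find?_eq_none]
    intro x hx
    simpa using hpre x hx
  rw [hfind, pvALoop_eq_filter lista [] hpre, List.nil_append]
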